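-- pv_equiv track=rewrite | github.com/Neccolini/Bitonic_Sort | Python/BitonicSort.py | _sub_sort
-- ===== SOURCE A (Python) =====
-- def _sub_sort(x:list,up:bool)->list:
--     if len(x)==1:
--         return x
--
--     else:
--         _compare_and_swap(x,up)
--         mid_point=len(x)//2
--         first=_sub_sort(x[:mid_point],up)
--         second=_sub_sort(x[mid_point:],up)
--
--         return first+second
--
-- def _compare_and_swap(x:list,up:bool)->list:
--     mid_point=len(x)//2
--     for i in range(mid_point):
--         if (x[i]>x[mid_point+i])==up:
--             x[i], x[mid_point+i]=x[mid_point+i],x[i]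
-- ===== SOURCE B (Python) =====
-- def _sub_sort(x: list, up: bool) -> list:
--     if len(x) == 1:
--         return x
--     res = list(x)
--     stack = [(0, len(res))]
--     while stack:
--         s, n = stack.pop()
--         if n <= 1:
--             continue
--         m = n // 2
--         for i in range(m):
--             a, b = res[s + i], res[s + m + i]
--             if (a > b) == up:
--                 res[s + i], res[s + m + i] = b, a
--         stack.append((s, m))
--         stack.append((s + m, n - m))
--     return res
-- ===== Notes on version B (the rewrite author's own statement) =====
-- stated objective: alternative
-- what changed: Replaced the divide-and-conquer recursion (which copies slices at every level) with an iterative explicit-stack traversal of contiguous (start,length) blocks doing compare-exchange passes in place on one working copy.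
import Mathlib
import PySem

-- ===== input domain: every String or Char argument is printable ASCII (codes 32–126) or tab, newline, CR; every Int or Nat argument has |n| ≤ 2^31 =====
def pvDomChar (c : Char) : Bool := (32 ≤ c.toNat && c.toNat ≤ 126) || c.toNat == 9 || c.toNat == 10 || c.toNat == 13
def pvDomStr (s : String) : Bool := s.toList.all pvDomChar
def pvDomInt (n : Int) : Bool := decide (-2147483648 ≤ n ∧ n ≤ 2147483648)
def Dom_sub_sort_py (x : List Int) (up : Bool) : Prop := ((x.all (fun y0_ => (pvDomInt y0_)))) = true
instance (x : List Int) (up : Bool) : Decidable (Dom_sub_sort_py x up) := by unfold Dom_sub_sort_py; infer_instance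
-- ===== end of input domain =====

-- B replaces A's slice-copying divide-and-conquer recursion by an iterative explicit-stack
-- traversal of (start,length) blocks on one working copy; equivalence is about the RETURN
-- value only (Python A also mutates its argument with the top-level compare-exchange pass,
-- B leaves the argument untouched).

-- ===== PORT A =====

-- _compare_and_swap: in-place loop ported as a foldl returning the updated list.
-- Indices i and mid+i are always in range (i < mid, mid+i < len), so getD/set are exact.
def cas_py (x : List Int) (up : Bool) : List Int :=
  let mid := x.length / 2
  (List.range mid).foldl (fun l i =>
    let a := l.getD i 0
    let b := l.getD (mid + i) 0
    if (decide (a > b)) == up then (l.set i b).set (mid + i) a else l) x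

theorem foldl_len_pres (f : List Int → Nat → List Int)
    (hf : ∀ l i, (f l i).length = l.length) :
    ∀ (r : List Nat) (l : List Int), (List.foldl f l r).length = l.length := by
  intro r
  induction r with
  | nil => intro l; rfl
  | cons i t ih => intro l; rw [List.foldl_cons, ih, hf]

theorem cas_py_length (x : List Int) (up : Bool) : (cas_py x up).length = x.length := by
  unfold cas_py
  exact foldl_len_pres _ (by intro l i; dsimp only; split <;> simp) _ x

-- Python tests len(x)==1; on the empty list Python recurses forever (RecursionError),
-- excluded by Pre_; the '≤ 1' guard only totalizes that crash point.
def sub_sort_py (x : List Int) (up : Bool) : List Int :=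
  if x.length ≤ 1 then x
  else
    let mid := x.length / 2
    let y := cas_py x up
    sub_sort_py (y.take mid) up ++ sub_sort_py (y.drop mid) up
termination_by x.length
decreasing_by
  · simp [cas_py_length]; omega
  · simp [cas_py_length]; omega

-- ===== PORT B =====

-- the inner 'for i in range(m)' compare-exchange pass of Source B, on block (s,n) of res
def casb (res : List Int) (s n : Nat) (up : Bool) : List Int :=
  let m := n / 2
  (List.range m).foldl (fun l i =>
    let a := l.getD (s + i) 0
    let b := l.getD (s + m + i) 0
    if (decide (a > b)) == up then (l.set (s + i) b).set (s + m + i) a else l) res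

-- the while-loop over the explicit stack of Source B (push = cons, pop = head: same LIFO)
def stackRun (stack : List (Nat × Nat)) (res : List Int) (up : Bool) : List Int :=
  match stack with
  | [] => res
  | (s, n) :: rest =>
      if n ≤ 1 then stackRun rest res up
      else
        let m := n / 2
        stackRun ((s + m, n - m) :: (s, m) :: rest) (casb res s n up) up
termination_by (stack.map (fun p => p.2 * p.2 + 1)).sum
decreasing_by
  · simp only [List.map_cons, List.sum_cons]; omega
  · simp only [List.map_cons, List.sum_cons]
    have h1 : 1 ≤ n / 2 := by omega
    have h2 : 1 ≤ n - n / 2 := by omega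
    have hn : n = n / 2 + (n - n / 2) := by omega
    nlinarith [Nat.one_le_iff_ne_zero.mp h1]

def sub_sort_py_alt (x : List Int) (up : Bool) : List Int :=
  if x.length == 1 then x
  else stackRun [(0, x.length)] x up

-- ===== PRECONDITION & SPEC =====
-- Pre_ excludes only the empty list, on which Python A never returns (RecursionError).
def Pre_sub_sort_py (x : List Int) (up : Bool) : Prop := x ≠ []
instance (x : List Int) (up : Bool) : Decidable (Pre_sub_sort_py x up) := by unfold Pre_sub_sort_py; infer_instance
def pvWitness_sub_sort_py : List Int × Bool := ([3, 1, 2], true)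

def Spec_sub_sort_py (x : List Int) (up : Bool) (out : List Int) : Prop := out = sub_sort_py_alt x up
instance (x : List Int) (up : Bool) (out : List Int) : Decidable (Spec_sub_sort_py x up out) := by unfold Spec_sub_sort_py; infer_instance

-- ===== CLAIM (what is proved, stated in full; the proofs are below) =====
def Claim_equal_sub_sort_py : Prop := ∀ (x : List Int) (up : Bool), Dom_sub_sort_py x up → Pre_sub_sort_py x up → Spec_sub_sort_py x up (sub_sort_py x up)
-- ===== LEMMAS AND PROOFS =====

-- the step functions of the two compare-exchange foldls, named for the proofs
def stepA (mid : Nat) (up : Bool) (l : List Int) (i : Nat) : List Int :=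
  let a := l.getD i 0
  let b := l.getD (mid + i) 0
  if (decide (a > b)) == up then (l.set i b).set (mid + i) a else l

def stepB (s m : Nat) (up : Bool) (l : List Int) (i : Nat) : List Int :=
  let a := l.getD (s + i) 0
  let b := l.getD (s + m + i) 0
  if (decide (a > b)) == up then (l.set (s + i) b).set (s + m + i) a else l

theorem cas_py_eq (x : List Int) (up : Bool) :
    cas_py x up = (List.range (x.length / 2)).foldl (stepA (x.length / 2) up) x := rfl

theorem casb_eq (res : List Int) (s n : Nat) (up : Bool) :
    casb res s n up = (List.range (n / 2)).foldl (stepB s (n / 2) up) res := rfl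

theorem stepA_len (mid : Nat) (up : Bool) (l : List Int) (i : Nat) :
    (stepA mid up l i).length = l.length := by
  unfold stepA; dsimp only; split <;> simp

theorem getD_splice (p t q : List Int) (i : Nat) (hi : i < t.length) :
    (p ++ t ++ q).getD (p.length + i) 0 = t.getD i 0 := by
  rw [List.append_assoc]
  simp [List.getD, List.getElem?_append_right (Nat.le_add_right p.length i),
        List.getElem?_append_left hi]

theorem set_splice (p t q : List Int) (i : Nat) (hi : i < t.length) (v : Int) :
    (p ++ t ++ q).set (p.length + i) v = p ++ t.set i v ++ q := by
  rw [List.append_assoc]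
  rw [List.set_append_right _ _ (Nat.le_add_right p.length i)]
  simp only [Nat.add_sub_cancel_left]
  rw [List.set_append_left _ _ hi, List.append_assoc]

theorem stepB_splice (p q l : List Int) (m i : Nat) (up : Bool)
    (hm : 2 * m ≤ l.length) (hi : i < m) :
    stepB p.length m up (p ++ l ++ q) i = p ++ stepA m up l i ++ q := by
  have h1 : i < l.length := by omega
  have h2 : m + i < l.length := by omega
  unfold stepB stepA
  dsimp only
  rw [getD_splice p l q i h1]
  rw [Nat.add_assoc, getD_splice p l q (m + i) h2]
  split
  · rw [set_splice p l q i h1,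
        set_splice p (l.set i _) q (m + i) (by simpa using h2)]
  · rfl

theorem foldl_splice (p q : List Int) (m : Nat) (up : Bool) :
    ∀ (k : Nat) (l : List Int), 2 * m ≤ l.length → k ≤ m →
      (List.range k).foldl (stepB p.length m up) (p ++ l ++ q)
        = p ++ (List.range k).foldl (stepA m up) l ++ q := by
  intro k
  induction k with
  | zero => intro l _ _; rfl
  | succ k ih =>
      intro l hl hk
      rw [List.range_succ, List.foldl_append, List.foldl_append]
      simp only [List.foldl_cons, List.foldl_nil]
      rw [ih l hl (by omega)]
      have hlen : ((List.range k).foldl (stepA m up) l).length = l.length :=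
        foldl_len_pres _ (stepA_len m up) _ l
      exact stepB_splice p q _ m k up (by omega) (by omega)

-- one in-place pass on block (|p|, |seg|) of p ++ seg ++ q is A's pass on seg, spliced
theorem casb_splice (p seg q : List Int) (up : Bool) :
    casb (p ++ seg ++ q) p.length seg.length up = p ++ cas_py seg up ++ q := by
  rw [casb_eq, cas_py_eq]
  exact foldl_splice p q _ up _ seg (by omega) (le_refl _)

-- fully processing one block, recursively (the depth-first order the stack realises)
def processBlock (res : List Int) (s n : Nat) (up : Bool) : List Int :=
  if n ≤ 1 then res
  else
    let m := n / 2
    processBlock (processBlock (casb res s n up) (s + m) (n - m) up) s m up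
termination_by n
decreasing_by
  · omega
  · omega

-- the stack machine fully processes the top block before touching the rest of the stack
theorem stackRun_pop (n : Nat) : ∀ (s : Nat) (res : List Int) (rest : List (Nat × Nat)) (up : Bool),
    stackRun ((s, n) :: rest) res up = stackRun rest (processBlock res s n up) up := by
  induction n using Nat.strong_induction_on with
  | _ n ih =>
      intro s res rest up
      rw [stackRun, processBlock]
      by_cases h : n ≤ 1
      · simp [h]
      · simp only [h, if_false]
        rw [ih (n - n / 2) (by omega), ih (n / 2) (by omega)]

theorem processBlock_splice (up : Bool) : ∀ (n : Nat) (seg p q : List Int), seg.length = n →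
    processBlock (p ++ seg ++ q) p.length n up = p ++ sub_sort_py seg up ++ q := by
  intro n
  induction n using Nat.strong_induction_on with
  | _ n ih =>
      intro seg p q hlen
      rw [processBlock, sub_sort_py]
      by_cases h : n ≤ 1
      · simp [h, hlen]
      · have hseg : ¬ seg.length ≤ 1 := by omega
        simp only [h, hseg, if_false]
        set m := n / 2 with hm
        have hmn : seg.length / 2 = m := by rw [hlen]
        have hc : casb (p ++ seg ++ q) p.length n up = p ++ cas_py seg up ++ q := by
          rw [← hlen]; exact casb_splice p seg q up
        rw [hc]
        set y := cas_py seg up with hy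
        have hylen : y.length = n := by rw [hy, cas_py_length, hlen]
        have htake : (y.take m).length = m := by simp [hylen]; omega
        have hdrop : (y.drop m).length = n - m := by simp [hylen]
        have hsplit : p ++ y ++ q = (p ++ y.take m) ++ y.drop m ++ q := by
          simp [List.append_assoc]
        have hslen : p.length + m = (p ++ y.take m).length := by simp [htake]
        rw [hsplit, hslen, ih (n - m) (by omega) (y.drop m) (p ++ y.take m) q hdrop]
        have hre : (p ++ y.take m) ++ sub_sort_py (y.drop m) up ++ q
            = p ++ y.take m ++ (sub_sort_py (y.drop m) up ++ q) := by
          simp [List.append_assoc]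
        rw [hre, ih m (by omega) (y.take m) p (sub_sort_py (y.drop m) up ++ q) htake]
        simp [hmn, List.append_assoc]

-- ===== VERDICT (by name: the statement is the Claim_ definition above) =====
theorem sub_sort_py_spec : Claim_equal_sub_sort_py := by
  intro x up _ _
  unfold Spec_sub_sort_py sub_sort_py_alt
  by_cases h : x.length == 1
  · simp only [h, if_true]
    rw [sub_sort_py]
    simp at h
    simp [h]
  · simp only [h]
    rw [if_neg (by simp_all), stackRun_pop, stackRun]
    have := processBlock_splice up x.length x [] [] rfl
    exact (by simpa using this : _ = sub_sort_py x up).symm
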